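-- pv_equiv track=rewrite | github.com/navin-gtmexp/Clay-Lite | clay_lite/sources/apollo.py | _pick_revenue_ranges
-- ===== SOURCE A (Python) =====
-- from typing import Optional
--
-- _REVENUE_RANGE_MAP = [
--     (0, 1_000_000, "1,1000000"),
--     (1_000_000, 10_000_000, "1000000,10000000"),
--     (10_000_000, 50_000_000, "10000000,50000000"),
--     (50_000_000, 100_000_000, "50000000,100000000"),
--     (100_000_000, 500_000_000, "100000000,500000000"),
--     (500_000_000, 1_000_000_000, "500000000,1000000000"),
--     (1_000_000_000, None, "1000000000,"),
-- ]
--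
-- def _pick_revenue_ranges(min_rev: Optional[int], max_rev: Optional[int]) -> list:
--     """Select Apollo revenue range strings that overlap with [min_rev, max_rev]."""
--     if min_rev is None and max_rev is None:
--         return []
--     ranges = []
--     for lo, hi, label in _REVENUE_RANGE_MAP:
--         range_lo = lo
--         range_hi = hi if hi is not None else float("inf")
--         filter_lo = min_rev if min_rev is not None else 0
--         filter_hi = max_rev if max_rev is not None else float("inf")
--         if range_lo < filter_hi and range_hi > filter_lo:
--             ranges.append(label)
--     return ranges
-- ===== SOURCE B (Python) =====
-- from typing import Optional
-- from bisect import bisect_left, bisect_right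
--
-- _REVENUE_RANGE_MAP = [
--     (0, 1_000_000, "1,1000000"),
--     (1_000_000, 10_000_000, "1000000,10000000"),
--     (10_000_000, 50_000_000, "10000000,50000000"),
--     (50_000_000, 100_000_000, "50000000,100000000"),
--     (100_000_000, 500_000_000, "100000000,500000000"),
--     (500_000_000, 1_000_000_000, "500000000,1000000000"),
--     (1_000_000_000, None, "1000000000,"),
-- ]
--
-- _LABELS = [label for _, _, label in _REVENUE_RANGE_MAP]
-- _LOS = [lo for lo, _, _ in _REVENUE_RANGE_MAP]
-- _HIS = [hi for _, hi, _ in _REVENUE_RANGE_MAP if hi is not None]  # finite high bounds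
--
-- def _pick_revenue_ranges(min_rev: Optional[int], max_rev: Optional[int]) -> list:
--     if min_rev is None and max_rev is None:
--         return []
--     # first range whose (finite) high bound strictly exceeds the lower filter
--     start = bisect_right(_HIS, min_rev if min_rev is not None else 0)
--     # first range whose low bound reaches the upper filter
--     stop = len(_LABELS) if max_rev is None else bisect_left(_LOS, max_rev)
--     return _LABELS[start:stop]
-- ===== Notes on version B (the rewrite author's own statement) =====
-- stated objective: alternative
-- what changed: Replaces the per-range overlap scan over _REVENUE_RANGE_MAP with a bisect band selection: binary-search the breakpoint tables for the first and last overlapping range and return one slice of the label list.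
import Mathlib
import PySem

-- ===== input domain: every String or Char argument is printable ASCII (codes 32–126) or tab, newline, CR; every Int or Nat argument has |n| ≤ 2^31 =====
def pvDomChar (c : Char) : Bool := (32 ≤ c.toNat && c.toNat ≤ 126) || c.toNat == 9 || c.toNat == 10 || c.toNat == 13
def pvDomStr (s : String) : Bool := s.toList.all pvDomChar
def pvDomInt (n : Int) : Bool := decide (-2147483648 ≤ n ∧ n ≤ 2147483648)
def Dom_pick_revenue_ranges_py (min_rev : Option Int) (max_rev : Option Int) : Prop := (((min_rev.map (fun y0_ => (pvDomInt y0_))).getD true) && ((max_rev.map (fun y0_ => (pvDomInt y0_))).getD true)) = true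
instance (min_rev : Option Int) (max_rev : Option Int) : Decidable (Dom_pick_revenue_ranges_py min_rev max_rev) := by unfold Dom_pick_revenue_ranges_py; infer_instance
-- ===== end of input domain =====

-- B replaces A's per-range overlap scan by a bisect band selection over the breakpoint
-- tables (binary search for the first and last overlapping range, then one slice).

-- ===== PORT A =====
-- _REVENUE_RANGE_MAP: (lo, hi, label); hi = None stands for float("inf")
def pvRevMap : List (Int × Option Int × String) :=
  [(0, some 1000000, "1,1000000"),
   (1000000, some 10000000, "1000000,10000000"),
   (10000000, some 50000000, "10000000,50000000"),
   (50000000, some 100000000, "50000000,100000000"),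
   (100000000, some 500000000, "100000000,500000000"),
   (500000000, some 1000000000, "500000000,1000000000"),
   (1000000000, none, "1000000000,")]

-- literal port of A; 'range_lo < filter_hi and range_hi > filter_lo' is Python's
-- short-circuit 'and', ported as nested ifs; a comparison against float("inf")
-- (hi or max_rev being None) is always true, which the Option matches encode exactly.
def pick_revenue_ranges_py (min_rev : Option Int) (max_rev : Option Int) : List String :=
  if min_rev = none ∧ max_rev = none then []
  else
    pvRevMap.foldl (fun ranges t =>
      let filter_lo := min_rev.getD 0
      if (match max_rev with | none => true | some fh => decide (t.1 < fh)) = true then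
        if (match t.2.1 with | none => true | some h => decide (filter_lo < h)) = true then
          ranges ++ [t.2.2]
        else ranges
      else ranges) []

-- ===== PORT B =====
-- _HIS: the finite high bounds;  _LOS: the low bounds;  _LABELS: the labels
def pvHis : List Int := [1000000, 10000000, 50000000, 100000000, 500000000, 1000000000]
def pvLos : List Int := [0, 1000000, 10000000, 50000000, 100000000, 500000000, 1000000000]
def pvLabels : List String :=
  ["1,1000000", "1000000,10000000", "10000000,50000000", "50000000,100000000",
   "100000000,500000000", "500000000,1000000000", "1000000000,"]

-- literal port of B: bisect_right/bisect_left band selection, then _LABELS[start:stop]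
def pick_revenue_ranges_py_alt (min_rev : Option Int) (max_rev : Option Int) : List String :=
  if min_rev = none ∧ max_rev = none then []
  else
    let start := PySem.List.bisectRight pvHis (min_rev.getD 0)
    let stop := match max_rev with
      | none => pvLabels.length
      | some b => PySem.List.bisectLeft pvLos b
    PySem.List.slice pvLabels (some (start : Int)) (some (stop : Int))

-- ===== PRECONDITION & SPEC =====
def Spec_pick_revenue_ranges_py (min_rev : Option Int) (max_rev : Option Int) (out : List String) : Prop := out = pick_revenue_ranges_py_alt min_rev max_rev
instance (min_rev : Option Int) (max_rev : Option Int) (out : List String) : Decidable (Spec_pick_revenue_ranges_py min_rev max_rev out) := by unfold Spec_pick_revenue_ranges_py; infer_instance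

-- ===== CLAIM (what is proved, stated in full; the proofs are below) =====
def Claim_equal_pick_revenue_ranges_py : Prop := ∀ (min_rev : Option Int) (max_rev : Option Int), Dom_pick_revenue_ranges_py min_rev max_rev → Spec_pick_revenue_ranges_py min_rev max_rev (pick_revenue_ranges_py min_rev max_rev)

-- ===== LEMMAS AND PROOFS =====

-- pin a bisect_right value from its spec
lemma bR_eq (xs : List Int) (x : Int) (k : Nat) (hs : List.Pairwise (· ≤ ·) xs)
    (hk : k ≤ xs.length)
    (hlow : 0 < k → xs.getD (k-1) 0 ≤ x)
    (hhigh : k < xs.length → x < xs.getD k 0) :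
    PySem.List.bisectRight xs x = k := by
  obtain ⟨h1, h2, h3⟩ := PySem.List.bisectRight_spec xs x hs
  set m := PySem.List.bisectRight xs x with hm
  rcases lt_trichotomy m k with h | h | h
  · have hk1 : k - 1 < xs.length := by omega
    have t1 := h3 (k-1) hk1 (by omega)
    have t2 := hlow (by omega)
    rw [List.getD_eq_getElem xs 0 hk1] at t2
    omega
  · exact h
  · have hkl : k < xs.length := by omega
    have t1 := h2 k hkl h
    have t2 := hhigh hkl
    rw [List.getD_eq_getElem xs 0 hkl] at t2
    omega

-- pin a bisect_left value from its spec
lemma bL_eq (xs : List Int) (x : Int) (k : Nat) (hs : List.Pairwise (· ≤ ·) xs)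
    (hk : k ≤ xs.length)
    (hlow : 0 < k → xs.getD (k-1) 0 < x)
    (hhigh : k < xs.length → x ≤ xs.getD k 0) :
    PySem.List.bisectLeft xs x = k := by
  obtain ⟨h1, h2, h3⟩ := PySem.List.bisectLeft_spec xs x hs
  set m := PySem.List.bisectLeft xs x with hm
  rcases lt_trichotomy m k with h | h | h
  · have hk1 : k - 1 < xs.length := by omega
    have t1 := h3 (k-1) hk1 (by omega)
    have t2 := hlow (by omega)
    rw [List.getD_eq_getElem xs 0 hk1] at t2
    omega
  · exact h
  · have hkl : k < xs.length := by omega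
    have t1 := h2 k hkl h
    have t2 := hhigh hkl
    rw [List.getD_eq_getElem xs 0 hkl] at t2
    omega

-- bisect_right over _HIS as an explicit interval chain
lemma startChain (a : Int) : PySem.List.bisectRight pvHis a =
    if a < 1000000 then 0 else if a < 10000000 then 1 else if a < 50000000 then 2
    else if a < 100000000 then 3 else if a < 500000000 then 4 else if a < 1000000000 then 5 else 6 := by
  split_ifs <;> (apply bR_eq _ _ _ (by decide) (by decide) <;> (intro h; simp [pvHis] at h ⊢ <;> omega))

-- bisect_left over _LOS as an explicit interval chain
lemma stopChain (b : Int) : PySem.List.bisectLeft pvLos b =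
    if 1000000000 < b then 7 else if 500000000 < b then 6 else if 100000000 < b then 5
    else if 50000000 < b then 4 else if 10000000 < b then 3 else if 1000000 < b then 2
    else if 0 < b then 1 else 0 := by
  split_ifs <;> (apply bL_eq _ _ _ (by decide) (by decide) <;> (intro h; simp [pvLos] at h ⊢ <;> omega))

-- interval case analyses for the filter bounds
lemma aCases (a : Int) :
      (a < 1000000 ∧ a < 10000000 ∧ a < 50000000 ∧ a < 100000000 ∧ a < 500000000 ∧ a < 1000000000) ∨
      (¬(a < 1000000) ∧ a < 10000000 ∧ a < 50000000 ∧ a < 100000000 ∧ a < 500000000 ∧ a < 1000000000) ∨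
      (¬(a < 1000000) ∧ ¬(a < 10000000) ∧ a < 50000000 ∧ a < 100000000 ∧ a < 500000000 ∧ a < 1000000000) ∨
      (¬(a < 1000000) ∧ ¬(a < 10000000) ∧ ¬(a < 50000000) ∧ a < 100000000 ∧ a < 500000000 ∧ a < 1000000000) ∨
      (¬(a < 1000000) ∧ ¬(a < 10000000) ∧ ¬(a < 50000000) ∧ ¬(a < 100000000) ∧ a < 500000000 ∧ a < 1000000000) ∨
      (¬(a < 1000000) ∧ ¬(a < 10000000) ∧ ¬(a < 50000000) ∧ ¬(a < 100000000) ∧ ¬(a < 500000000) ∧ a < 1000000000) ∨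
      (¬(a < 1000000) ∧ ¬(a < 10000000) ∧ ¬(a < 50000000) ∧ ¬(a < 100000000) ∧ ¬(a < 500000000) ∧ ¬(a < 1000000000)) := by
  rcases Int.lt_or_le a 1000000 with h0 | h0
  · exact Or.inl ⟨by omega, by omega, by omega, by omega, by omega, by omega⟩
  · rcases Int.lt_or_le a 10000000 with h1 | h1
    · exact Or.inr (Or.inl ⟨by omega, by omega, by omega, by omega, by omega, by omega⟩)
    · rcases Int.lt_or_le a 50000000 with h2 | h2
      · exact Or.inr (Or.inr (Or.inl ⟨by omega, by omega, by omega, by omega, by omega, by omega⟩))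
      · rcases Int.lt_or_le a 100000000 with h3 | h3
        · exact Or.inr (Or.inr (Or.inr (Or.inl ⟨by omega, by omega, by omega, by omega, by omega, by omega⟩)))
        · rcases Int.lt_or_le a 500000000 with h4 | h4
          · exact Or.inr (Or.inr (Or.inr (Or.inr (Or.inl ⟨by omega, by omega, by omega, by omega, by omega, by omega⟩))))
          · rcases Int.lt_or_le a 1000000000 with h5 | h5
            · exact Or.inr (Or.inr (Or.inr (Or.inr (Or.inr (Or.inl ⟨by omega, by omega, by omega, by omega, by omega, by omega⟩)))))
            · exact Or.inr (Or.inr (Or.inr (Or.inr (Or.inr (Or.inr (⟨by omega, by omega, by omega, by omega, by omega, by omega⟩))))))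

lemma bCases (b : Int) :
      (¬(0 < b) ∧ ¬(1000000 < b) ∧ ¬(10000000 < b) ∧ ¬(50000000 < b) ∧ ¬(100000000 < b) ∧ ¬(500000000 < b) ∧ ¬(1000000000 < b)) ∨
      (0 < b ∧ ¬(1000000 < b) ∧ ¬(10000000 < b) ∧ ¬(50000000 < b) ∧ ¬(100000000 < b) ∧ ¬(500000000 < b) ∧ ¬(1000000000 < b)) ∨
      (0 < b ∧ 1000000 < b ∧ ¬(10000000 < b) ∧ ¬(50000000 < b) ∧ ¬(100000000 < b) ∧ ¬(500000000 < b) ∧ ¬(1000000000 < b)) ∨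
      (0 < b ∧ 1000000 < b ∧ 10000000 < b ∧ ¬(50000000 < b) ∧ ¬(100000000 < b) ∧ ¬(500000000 < b) ∧ ¬(1000000000 < b)) ∨
      (0 < b ∧ 1000000 < b ∧ 10000000 < b ∧ 50000000 < b ∧ ¬(100000000 < b) ∧ ¬(500000000 < b) ∧ ¬(1000000000 < b)) ∨
      (0 < b ∧ 1000000 < b ∧ 10000000 < b ∧ 50000000 < b ∧ 100000000 < b ∧ ¬(500000000 < b) ∧ ¬(1000000000 < b)) ∨
      (0 < b ∧ 1000000 < b ∧ 10000000 < b ∧ 50000000 < b ∧ 100000000 < b ∧ 500000000 < b ∧ ¬(1000000000 < b)) ∨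
      (0 < b ∧ 1000000 < b ∧ 10000000 < b ∧ 50000000 < b ∧ 100000000 < b ∧ 500000000 < b ∧ 1000000000 < b) := by
  rcases le_or_gt b 0 with h0 | h0
  · exact Or.inl ⟨by omega, by omega, by omega, by omega, by omega, by omega, by omega⟩
  · rcases le_or_gt b 1000000 with h1 | h1
    · exact Or.inr (Or.inl ⟨by omega, by omega, by omega, by omega, by omega, by omega, by omega⟩)
    · rcases le_or_gt b 10000000 with h2 | h2
      · exact Or.inr (Or.inr (Or.inl ⟨by omega, by omega, by omega, by omega, by omega, by omega, by omega⟩))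
      · rcases le_or_gt b 50000000 with h3 | h3
        · exact Or.inr (Or.inr (Or.inr (Or.inl ⟨by omega, by omega, by omega, by omega, by omega, by omega, by omega⟩)))
        · rcases le_or_gt b 100000000 with h4 | h4
          · exact Or.inr (Or.inr (Or.inr (Or.inr (Or.inl ⟨by omega, by omega, by omega, by omega, by omega, by omega, by omega⟩))))
          · rcases le_or_gt b 500000000 with h5 | h5
            · exact Or.inr (Or.inr (Or.inr (Or.inr (Or.inr (Or.inl ⟨by omega, by omega, by omega, by omega, by omega, by omega, by omega⟩)))))
            · rcases le_or_gt b 1000000000 with h6 | h6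
              · exact Or.inr (Or.inr (Or.inr (Or.inr (Or.inr (Or.inr (Or.inl ⟨by omega, by omega, by omega, by omega, by omega, by omega, by omega⟩))))))
              · exact Or.inr (Or.inr (Or.inr (Or.inr (Or.inr (Or.inr (Or.inr (⟨by omega, by omega, by omega, by omega, by omega, by omega, by omega⟩)))))))


set_option maxHeartbeats 4000000 in
lemma case_some_some (a b : Int) :
    pick_revenue_ranges_py (some a) (some b) = pick_revenue_ranges_py_alt (some a) (some b) := by
  rcases aCases a with ⟨ha1,ha2,ha3,ha4,ha5,ha6⟩|⟨ha1,ha2,ha3,ha4,ha5,ha6⟩|⟨ha1,ha2,ha3,ha4,ha5,ha6⟩|⟨ha1,ha2,ha3,ha4,ha5,ha6⟩|⟨ha1,ha2,ha3,ha4,ha5,ha6⟩|⟨ha1,ha2,ha3,ha4,ha5,ha6⟩|⟨ha1,ha2,ha3,ha4,ha5,ha6⟩ <;>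
    rcases bCases b with ⟨hb1,hb2,hb3,hb4,hb5,hb6,hb7⟩|⟨hb1,hb2,hb3,hb4,hb5,hb6,hb7⟩|⟨hb1,hb2,hb3,hb4,hb5,hb6,hb7⟩|⟨hb1,hb2,hb3,hb4,hb5,hb6,hb7⟩|⟨hb1,hb2,hb3,hb4,hb5,hb6,hb7⟩|⟨hb1,hb2,hb3,hb4,hb5,hb6,hb7⟩|⟨hb1,hb2,hb3,hb4,hb5,hb6,hb7⟩|⟨hb1,hb2,hb3,hb4,hb5,hb6,hb7⟩ <;>
      (simp only [pick_revenue_ranges_py, pick_revenue_ranges_py_alt, pvRevMap, List.foldl_cons,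
        List.foldl_nil, Option.getD_some, startChain, stopChain, reduceCtorEq, and_false,
        if_false, if_true, decide_true, decide_false, Bool.false_eq_true,
        ha1, ha2, ha3, ha4, ha5, ha6, hb1, hb2, hb3, hb4, hb5, hb6, hb7]; rfl)

set_option maxHeartbeats 4000000 in
lemma case_some_none (a : Int) :
    pick_revenue_ranges_py (some a) none = pick_revenue_ranges_py_alt (some a) none := by
  rcases aCases a with ⟨ha1,ha2,ha3,ha4,ha5,ha6⟩|⟨ha1,ha2,ha3,ha4,ha5,ha6⟩|⟨ha1,ha2,ha3,ha4,ha5,ha6⟩|⟨ha1,ha2,ha3,ha4,ha5,ha6⟩|⟨ha1,ha2,ha3,ha4,ha5,ha6⟩|⟨ha1,ha2,ha3,ha4,ha5,ha6⟩|⟨ha1,ha2,ha3,ha4,ha5,ha6⟩ <;>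
    (simp only [pick_revenue_ranges_py, pick_revenue_ranges_py_alt, pvRevMap, List.foldl_cons,
      List.foldl_nil, Option.getD_some, startChain, reduceCtorEq, false_and,
      if_false, if_true, decide_true, decide_false, Bool.false_eq_true,
      ha1, ha2, ha3, ha4, ha5, ha6]; rfl)

set_option maxHeartbeats 4000000 in
lemma case_none_some (b : Int) :
    pick_revenue_ranges_py none (some b) = pick_revenue_ranges_py_alt none (some b) := by
  rcases bCases b with ⟨hb1,hb2,hb3,hb4,hb5,hb6,hb7⟩|⟨hb1,hb2,hb3,hb4,hb5,hb6,hb7⟩|⟨hb1,hb2,hb3,hb4,hb5,hb6,hb7⟩|⟨hb1,hb2,hb3,hb4,hb5,hb6,hb7⟩|⟨hb1,hb2,hb3,hb4,hb5,hb6,hb7⟩|⟨hb1,hb2,hb3,hb4,hb5,hb6,hb7⟩|⟨hb1,hb2,hb3,hb4,hb5,hb6,hb7⟩|⟨hb1,hb2,hb3,hb4,hb5,hb6,hb7⟩ <;>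
    (simp only [pick_revenue_ranges_py, pick_revenue_ranges_py_alt, pvRevMap, List.foldl_cons,
      List.foldl_nil, stopChain, reduceCtorEq, and_false,
      if_false, if_true, decide_true, decide_false, Bool.false_eq_true,
      hb1, hb2, hb3, hb4, hb5, hb6, hb7]; rfl)

-- ===== VERDICT (by name: the statement is the Claim_ definition above) =====
theorem pick_revenue_ranges_py_spec : Claim_equal_pick_revenue_ranges_py := by
  intro min_rev max_rev _
  unfold Spec_pick_revenue_ranges_py
  cases min_rev with
  | none =>
    cases max_rev with
    | none => rfl
    | some b => exact case_none_some b
  | some a =>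
    cases max_rev with
    | none => exact case_some_none a
    | some b => exact case_some_some a b
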